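-- pv_equiv track=rewrite | github.com/Xychic/AdventOfCode | Day16/Python/FFT.py | phase
-- ===== SOURCE A (Python) =====
-- def getPattern(pattern, index):
--     res = []
--     for x in pattern:
--         res += [x] * index
--     return res
--
-- def phase(signal, pattern):
--     result = []
--     for i in range(len(signal)):
--         p = getPattern(pattern, i+1)
--         total = 0
--         for j in range(len(signal)):
--             total += signal[j] * p[(j+1)%len(p)]
--         result.append(abs(total)%10)
--     return result
-- ===== SOURCE B (Python) =====
-- def phase(sig, pattern):
--     n = len(sig)
--     m = len(pattern)
--     prefix = [0]
--     for x in sig: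
--         prefix.append(prefix[-1] + x)
--     result = []
--     for i in range(n):
--         rep = i + 1
--         total = 0
--         b = 0
--         start = -1
--         while start < n:
--             v = pattern[b % m]
--             lo = max(start, 0)
--             hi = min(start + rep, n)
--             if v != 0 and hi > lo:
--                 total += v * (prefix[hi] - prefix[lo])
--             b += 1
--             start += rep
--         result.append(abs(total) % 10)
--     return result
-- ===== Notes on version B (the rewrite author's own statement) =====
-- stated objective: faster
-- what changed: B precomputes a prefix-sum array of the signal and, for each output row, sums contiguous constant-pattern blocks (skipping zero blocks) instead of materialising the repeated pattern and taking an O(n) dot product per row.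
import Mathlib
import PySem

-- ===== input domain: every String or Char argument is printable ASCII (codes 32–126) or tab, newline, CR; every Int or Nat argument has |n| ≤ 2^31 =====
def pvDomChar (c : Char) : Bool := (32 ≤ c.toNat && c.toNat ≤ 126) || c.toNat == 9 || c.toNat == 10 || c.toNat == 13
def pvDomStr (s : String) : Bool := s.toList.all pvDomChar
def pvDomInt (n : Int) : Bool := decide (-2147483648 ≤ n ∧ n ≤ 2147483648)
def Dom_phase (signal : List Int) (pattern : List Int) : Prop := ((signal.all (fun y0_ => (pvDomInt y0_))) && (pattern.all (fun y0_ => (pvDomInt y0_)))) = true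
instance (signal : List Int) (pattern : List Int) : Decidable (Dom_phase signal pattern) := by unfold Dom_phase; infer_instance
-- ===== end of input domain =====

-- B replaces A's O(n^2) pattern-expansion-and-dot-product with prefix sums and
-- per-row contiguous constant-pattern blocks (O(n log n)); return values proved equal.

-- ===== PORT A =====
def getPattern (pattern : List Int) (index : Nat) : List Int :=
  pattern.foldl (fun res x => res ++ List.replicate index x) []

def phase (signal : List Int) (pattern : List Int) : List Int :=
  (List.range signal.length).foldl (fun result i =>
    let p := getPattern pattern (i+1)
    let total := (List.range signal.length).foldl (fun total j =>
      total + signal.getD j 0 * p.getD ((j+1) % p.length) 0) 0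
    result ++ [((total.natAbs % 10 : Nat) : Int)]) []

-- ===== PORT B =====
def prefixSums (signal : List Int) : List Int :=
  signal.foldl (fun pre x => pre ++ [(pre.getLast?).getD 0 + x]) [0]

def blocks (pattern pre : List Int) (n i b : Nat) (start : Int) (total : Int) : Int :=
  if h : start < (n : Int) then
    let v := pattern.getD (b % pattern.length) 0
    let lo := max start 0
    let hi := min (start + ((i : Int) + 1)) (n : Int)
    let total' := if v ≠ 0 ∧ lo < hi then
        total + v * (pre.getD hi.toNat 0 - pre.getD lo.toNat 0)
      else total
    blocks pattern pre n i (b+1) (start + ((i : Int) + 1)) total'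
  else total
termination_by ((n : Int) + 1 - start).toNat
decreasing_by omega

def phase_alt (signal : List Int) (pattern : List Int) : List Int :=
  let n := signal.length
  let pre := prefixSums signal
  (List.range n).foldl (fun result i =>
    result ++ [(((blocks pattern pre n i 0 (-1) 0).natAbs % 10 : Nat) : Int)]) []

-- ===== PRECONDITION & SPEC =====
-- Pre_ excludes pattern = [] with a nonempty signal: there Python A raises
-- ZeroDivisionError at '(j+1)%len(p)' (and B raises at 'pattern[b % m]' too).
def Pre_phase (signal : List Int) (pattern : List Int) : Prop :=
  pattern ≠ [] ∨ signal = []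
instance (signal : List Int) (pattern : List Int) : Decidable (Pre_phase signal pattern) := by
  unfold Pre_phase; infer_instance

def pvWitness_phase : List Int × List Int := ([1, 2, 3, 4, 5, 6, 7, 8], [0, 1, 0, -1])

def Spec_phase (signal : List Int) (pattern : List Int) (out : List Int) : Prop :=
  out = phase_alt signal pattern
instance (signal : List Int) (pattern : List Int) (out : List Int) : Decidable (Spec_phase signal pattern out) := by
  unfold Spec_phase; infer_instance

-- ===== CLAIM (what is proved, stated in full; the proofs are below) =====
def Claim_equal_phase : Prop := ∀ (signal : List Int) (pattern : List Int), Dom_phase signal pattern → Pre_phase signal pattern → Spec_phase signal pattern (phase signal pattern)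

-- ===== LEMMAS AND PROOFS =====

-- the common reference value of row i, term j
def rowTerm (signal pattern : List Int) (rep j : Nat) : Int :=
  signal.getD j 0 * pattern.getD (((j+1) % (pattern.length * rep)) / rep) 0

lemma sum_map_range (h : Nat → Int) (n : Nat) :
    ((List.range n).map h).sum = ∑ j ∈ Finset.range n, h j := by
  induction n with
  | zero => simp
  | succ n ih => simp [List.range_succ, Finset.sum_range_succ, ih]

lemma getPattern_eq (pattern : List Int) (index : Nat) :
    getPattern pattern index = pattern.flatMap (List.replicate index) := by
  unfold getPattern
  simpa using PySem.List.foldl_append_eq_flatMap (List.replicate index) pattern []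

lemma getPattern_length (pattern : List Int) (index : Nat) :
    (getPattern pattern index).length = pattern.length * index := by
  rw [getPattern_eq]
  induction pattern with
  | nil => simp
  | cons x ps ih => simp [List.flatMap_cons, ih]; ring

lemma getPattern_getD (index : Nat) (hrep : 0 < index) :
    ∀ (pattern : List Int) (t : Nat), t < pattern.length * index →
      (getPattern pattern index).getD t 0 = pattern.getD (t / index) 0 := by
  intro pattern
  induction pattern with
  | nil => intro t ht; simp at ht
  | cons x ps ih =>
    intro t ht
    rw [getPattern_eq, List.flatMap_cons]
    by_cases hlt : t < index
    · rw [List.getD_append _ _ _ _ (by simpa using hlt), Nat.div_eq_of_lt hlt]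
      simp [List.getD_eq_getElem?_getD, List.getElem?_replicate, hlt]
    · push_neg at hlt
      rw [List.getD_append_right _ _ _ _ (by simpa using hlt), List.length_replicate]
      have h1 : t - index < ps.length * index := by
        simp only [List.length_cons] at ht
        have hsm : (ps.length + 1) * index = ps.length * index + index := by ring
        omega
      have hrec := ih (t - index) h1
      rw [getPattern_eq] at hrec
      rw [hrec, Nat.div_eq_sub_div hrep hlt]
      simp [List.getD_eq_getElem?_getD]

lemma prefixSums_eq (s : List Int) :
    prefixSums s = (List.range (s.length + 1)).map (fun k => (s.take k).sum) := by
  induction s using List.reverseRecOn with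
  | nil => simp [prefixSums]
  | append_singleton s x ih =>
    have hstep : prefixSums (s ++ [x]) = prefixSums s ++ [(prefixSums s).getLast?.getD 0 + x] := by
      unfold prefixSums
      rw [List.foldl_append]
      rfl
    have hlast : (prefixSums s).getLast?.getD 0 = s.sum := by
      rw [ih, List.range_succ, List.map_append]
      simp
    rw [hstep, hlast, ih]
    rw [List.length_append, List.length_cons, List.length_nil]
    rw [List.range_succ (n := s.length + 1), List.map_append]
    congr 1
    · apply List.map_congr_left
      intro k hk
      rw [List.mem_range] at hk
      rw [List.take_append_of_le_length (by omega)]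
    · simp

lemma prefixSums_getD (s : List Int) (k : Nat) (hk : k ≤ s.length) :
    (prefixSums s).getD k 0 = ∑ j ∈ Finset.range k, s.getD j 0 := by
  rw [prefixSums_eq]
  have hlen : k < ((List.range (s.length + 1)).map (fun k => (s.take k).sum)).length := by
    simp; omega
  rw [List.getD_eq_getElem _ _ hlen]
  simp only [List.getElem_map, List.getElem_range]
  induction k with
  | zero => simp
  | succ k ih =>
    rw [List.take_succ, List.sum_append, ih (by omega) (by simp; omega)]
    rw [Finset.sum_range_succ]
    have : k < s.length := by omega
    simp [List.getElem?_eq_getElem this, List.getD, List.getElem?_eq_getElem, this]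

lemma mod_div_block (m rep b r : Nat) (hm : 0 < m) (hrep : 0 < rep) (hr : r < rep) :
    ((b * rep + r) % (m * rep)) / rep = b % m := by
  have hdecomp : b * rep + r = ((b % m) * rep + r) + (m * rep) * (b / m) := by
    have : b = m * (b / m) + b % m := (Nat.div_add_mod b m).symm
    calc b * rep + r = (m * (b / m) + b % m) * rep + r := by rw [← this]
      _ = ((b % m) * rep + r) + (m * rep) * (b / m) := by ring
  rw [hdecomp, Nat.add_mul_mod_self_left]
  have hlt : (b % m) * rep + r < m * rep := by
    have h1 : b % m < m := Nat.mod_lt _ hm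
    have : (b % m) * rep + r < (b % m + 1) * rep := by
      rw [Nat.succ_mul]; omega
    have h2 : (b % m + 1) * rep ≤ m * rep := Nat.mul_le_mul_right rep (by omega)
    omega
  rw [Nat.mod_eq_of_lt hlt]
  rw [Nat.mul_comm (b % m) rep, Nat.mul_add_div hrep, Nat.div_eq_of_lt hr]
  omega

lemma blocks_sum (signal pattern : List Int) (i : Nat) (hm : pattern ≠ []) :
    ∀ (k b : Nat) (total : Int), signal.length + 1 - b ≤ k →
      blocks pattern (prefixSums signal) signal.length i b (((b * (i+1) : Nat) : Int) - 1) total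
        = total + ∑ j ∈ Finset.Ico (b * (i+1) - 1) signal.length, rowTerm signal pattern (i+1) j := by
  intro k
  induction k with
  | zero =>
    intro b total hb
    have hbn : signal.length + 1 ≤ b := by omega
    have h2 : signal.length + 1 ≤ b * (i+1) := by
      have : b ≤ b * (i+1) := Nat.le_mul_of_pos_right b (by omega)
      omega
    have hge : signal.length ≤ b * (i+1) - 1 := by omega
    rw [blocks]
    rw [dif_neg (by omega)]
    rw [Finset.Ico_eq_empty (by simpa using hge)]
    simp
  | succ k ihk =>
    intro b total hb
    set n := signal.length with hn
    by_cases hstop : ((b * (i+1) : Nat) : Int) - 1 ≥ (n : Int)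
    · have hge : n ≤ b * (i+1) - 1 := by omega
      rw [blocks, dif_neg (by omega)]
      rw [Finset.Ico_eq_empty (by simpa using hge)]
      simp
    · push_neg at hstop
      have hm0 : 0 < pattern.length := List.length_pos_iff.mpr hm
      have hbn : b ≤ n := by
        have : b ≤ b * (i+1) := Nat.le_mul_of_pos_right b (by omega)
        omega
      rw [blocks, dif_pos hstop]
      have hx : (b+1) * (i+1) = b * (i+1) + (i+1) := by ring
      have hrec : (((b * (i+1) : Nat) : Int) - 1) + ((i : Int) + 1) = (((b+1) * (i+1) : Nat) : Int) - 1 := by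
        push_cast; ring
      rw [hrec]
      rw [ihk (b+1) _ (by omega)]
      set loN : Nat := b * (i+1) - 1 with hloN
      set hiN : Nat := min ((b+1) * (i+1) - 1) n with hhiN
      have hlo' : (max (((b * (i+1) : Nat) : Int) - 1) 0).toNat = loN := by omega
      have hhi' : (min ((((b+1) * (i+1) : Nat) : Int) - 1) (n : Int)).toNat = hiN := by omega
      have hlohi : loN ≤ hiN := by omega
      have hhin : hiN ≤ n := by omega
      have hlon : loN ≤ n := by omega
      have hterm : ∀ j ∈ Finset.Ico loN hiN,
          rowTerm signal pattern (i+1) j = signal.getD j 0 * pattern.getD (b % pattern.length) 0 := by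
        intro j hj
        rw [Finset.mem_Ico] at hj
        have hj1 : j + 1 = b * (i+1) + (j + 1 - b * (i+1)) := by omega
        have hrlt : j + 1 - b * (i+1) < i + 1 := by
          have h2 : j < hiN := hj.2
          omega
        unfold rowTerm
        rw [hj1, mod_div_block pattern.length (i+1) b _ hm0 (by omega) hrlt]
      have hstep : (if pattern.getD (b % pattern.length) 0 ≠ 0 ∧
              max (((b * (i+1) : Nat) : Int) - 1) 0 < min ((((b+1) * (i+1) : Nat) : Int) - 1) (n : Int) then
            total + pattern.getD (b % pattern.length) 0 *
              ((prefixSums signal).getD (min ((((b+1) * (i+1) : Nat) : Int) - 1) (n : Int)).toNat 0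
               - (prefixSums signal).getD (max (((b * (i+1) : Nat) : Int) - 1) 0).toNat 0)
          else total)
          = total + ∑ j ∈ Finset.Ico loN hiN, rowTerm signal pattern (i+1) j := by
        rw [Finset.sum_congr rfl hterm]
        split_ifs with hcase
        · rw [hlo', hhi', prefixSums_getD signal hiN hhin, prefixSums_getD signal loN hlon,
            ← Finset.sum_Ico_eq_sub _ hlohi, Finset.mul_sum]
          congr 1
          exact Finset.sum_congr rfl (fun j _ => by ring)
        · push_neg at hcase
          by_cases hv : pattern.getD (b % pattern.length) 0 = 0
          · rw [Finset.sum_eq_zero (fun j _ => by rw [hv, mul_zero])]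
            ring
          · have h2 := hcase hv
            have h3 : loN = hiN := by omega
            rw [h3, Finset.Ico_self, Finset.sum_empty]
            ring
      rw [hstep, add_assoc]
      congr 1
      by_cases hcut : (b+1) * (i+1) - 1 ≤ n
      · have h1 : hiN = (b+1) * (i+1) - 1 := by omega
        rw [h1]
        exact Finset.sum_Ico_consecutive _ (by omega) (by omega)
      · have h1 : hiN = n := by omega
        have h2 : Finset.Ico ((b+1) * (i+1) - 1) n = ∅ := Finset.Ico_eq_empty (by omega)
        rw [h1, h2, Finset.sum_empty, add_zero]

lemma row_eq (signal pattern : List Int) (i : Nat) (hm : pattern ≠ []) :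
    (List.range signal.length).foldl (fun total j =>
        total + signal.getD j 0 * (getPattern pattern (i+1)).getD ((j+1) % (getPattern pattern (i+1)).length) 0) 0
      = blocks pattern (prefixSums signal) signal.length i 0 (-1) 0 := by
  have hm0 : 0 < pattern.length := List.length_pos_iff.mpr hm
  have hL : 0 < pattern.length * (i+1) := by positivity
  have hA : (List.range signal.length).foldl (fun total j =>
        total + signal.getD j 0 * (getPattern pattern (i+1)).getD ((j+1) % (getPattern pattern (i+1)).length) 0) 0
      = ∑ j ∈ Finset.range signal.length, rowTerm signal pattern (i+1) j := by
    rw [PySem.List.foldl_add]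
    rw [sum_map_range]
    simp only [zero_add]
    apply Finset.sum_congr rfl
    intro j _
    unfold rowTerm
    rw [getPattern_length]
    rw [getPattern_getD (i+1) (by omega) pattern _ (Nat.mod_lt _ hL)]
  have hB := blocks_sum signal pattern i hm (signal.length + 1) 0 0 (by omega)
  simp only [Nat.zero_mul, Nat.cast_zero, zero_sub, Nat.zero_sub, zero_add] at hB
  rw [hA, hB, Finset.range_eq_Ico]

-- ===== VERDICT (by name: the statement is the Claim_ definition above) =====
theorem phase_spec : Claim_equal_phase := by
  intro signal pattern _ hpre
  unfold Spec_phase phase phase_alt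
  rcases hpre with hm | hnil
  · rw [PySem.List.foldl_append_singleton_eq_map, PySem.List.foldl_append_singleton_eq_map]
    simp only [List.nil_append]
    apply List.map_congr_left
    intro i _
    rw [row_eq signal pattern i hm]
  · subst hnil; simp
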